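-- pv_equiv track=rewrite | github.com/omicsEye/waveome | waveome/utilities.py | check_if_model_exists
-- ===== SOURCE A (Python) =====
-- def check_if_model_exists(model_name, model_list):
--     """
--     Checks if current model name is in list of fit models.
--     """
--     found_model = None
--
--     # First split models into additive components
--     model_name_split = model_name.split("+")
--     model_list_split = [x.split("+") for x in model_list]
--
--     # Then order the resulting product pieces
--     model_name_split_ordered = ["".join(sorted(x)) for x in model_name_split]
--     # model_list_split_ordered = [
--     #     "".join(sorted(x)) for y in model_list_split for x in y
--     # ]
--
--     term_diff = [
--         set(model_name_split_ordered) ^ set(["".join(sorted(x)) for x in y])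
--         for y in model_list_split
--     ]
--
--     if set() in term_diff:
--         found_model = True
--     else:
--         found_model = False
--
--     return found_model
-- ===== SOURCE B (Python) =====
-- def check_if_model_exists(model_name, model_list):
--     """
--     Loop-based rewrite without sets or sorting: two terms are the same
--     product up to factor order iff they are character-count equal, and a
--     candidate matches iff its term list and the target's term list cover
--     each other under that relation.
--     """
--     def same_term(a, b):
--         return len(a) == len(b) and all(a.count(c) == b.count(c) for c in a)
--
--     def covers(xs, ys):
--         return all(any(same_term(x, y) for y in ys) for x in xs)
--
--     name_terms = model_name.split("+")
--     for candidate in model_list: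
--         terms = candidate.split("+")
--         if covers(name_terms, terms) and covers(terms, name_terms):
--             return True
--     return False
-- ===== Notes on version B (the rewrite author's own statement) =====
-- stated objective: alternative
-- what changed: Replaces per-model set canonicalization (sorted-term strings, symmetric differences, empty-set scan) with a sort-free bidirectional coverage check: terms are compared directly by character counts and each candidate is tested by mutual all/any coverage of the two term lists, with an early return.
import Mathlib
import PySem

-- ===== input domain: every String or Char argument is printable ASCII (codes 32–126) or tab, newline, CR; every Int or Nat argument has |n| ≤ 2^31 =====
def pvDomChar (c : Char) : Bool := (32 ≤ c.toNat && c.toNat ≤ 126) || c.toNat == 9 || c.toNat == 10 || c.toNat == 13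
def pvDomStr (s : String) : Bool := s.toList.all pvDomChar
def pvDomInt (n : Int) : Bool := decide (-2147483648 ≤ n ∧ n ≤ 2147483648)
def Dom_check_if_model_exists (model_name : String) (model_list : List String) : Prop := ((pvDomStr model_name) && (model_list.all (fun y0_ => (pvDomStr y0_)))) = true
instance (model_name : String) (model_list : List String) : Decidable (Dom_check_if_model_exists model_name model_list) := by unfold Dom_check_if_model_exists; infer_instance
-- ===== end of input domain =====

-- B drops A's sorting/set machinery: terms compare by character counts and candidates by mutual term-list coverage (alternative decomposition, no speed claim).

-- ===== PORT A =====
-- "".join(sorted(x)) on a term (strings handled as char lists per PySem)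
def sortJoin (x : List Char) : List Char :=
  PySem.List.sorted x (fun c => c) false

def check_if_model_exists (model_name : String) (model_list : List String) : Bool :=
  let model_name_split := PySem.Chars.splitOn model_name.toList "+".toList
  let model_list_split := model_list.map (fun x => PySem.Chars.splitOn x.toList "+".toList)
  let model_name_split_ordered := model_name_split.map (fun x => sortJoin x)
  let term_diff := model_list_split.map (fun y =>
    PySem.Set.symmDiff (PySem.Set.ofList model_name_split_ordered)
      (PySem.Set.ofList (y.map (fun x => sortJoin x))))
  -- 'set() in term_diff': membership in a Python list of sets compares by set equality
  if term_diff.any (fun s => PySem.Set.equal PySem.Set.empty s) then true else false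

-- ===== PORT B =====
-- same_term(a, b): len(a) == len(b) and all(a.count(c) == b.count(c) for c in a)
-- (a.count(c) is Python substring count of the single-char string c → PySem.Chars.count a [c])
def pvSameTerm (a b : List Char) : Bool :=
  a.length == b.length && a.all (fun c => PySem.Chars.count a [c] == PySem.Chars.count b [c])

-- covers(xs, ys): all(any(same_term(x, y) for y in ys) for x in xs)
def pvCovers (xs ys : List (List Char)) : Bool :=
  xs.all (fun x => ys.any (fun y => pvSameTerm x y))

def check_if_model_exists_alt (model_name : String) (model_list : List String) : Bool :=
  let name_terms := PySem.Chars.splitOn model_name.toList "+".toList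
  -- 'for candidate in model_list: … return True' / final 'return False' is List.any
  model_list.any (fun candidate =>
    let terms := PySem.Chars.splitOn candidate.toList "+".toList
    pvCovers name_terms terms && pvCovers terms name_terms)

-- ===== PRECONDITION & SPEC =====
def Spec_check_if_model_exists (model_name : String) (model_list : List String) (out : Bool) : Prop := out = check_if_model_exists_alt model_name model_list
instance (model_name : String) (model_list : List String) (out : Bool) : Decidable (Spec_check_if_model_exists model_name model_list out) := by unfold Spec_check_if_model_exists; infer_instance

-- ===== CLAIM (what is proved, stated in full; the proofs are below) =====
def Claim_equal_check_if_model_exists : Prop := ∀ (model_name : String) (model_list : List String), Dom_check_if_model_exists model_name model_list → Spec_check_if_model_exists model_name model_list (check_if_model_exists model_name model_list)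

-- ===== LEMMAS AND PROOFS =====

-- Python's s.count(c) for a single character c is the character count
theorem pv_count_go (c : Char) (s : List Char) (fuel acc : Nat) (h : s.length ≤ fuel) :
    PySem.Chars.count.go [c] fuel s acc = acc + s.count c := by
  induction s generalizing fuel acc with
  | nil => cases fuel <;> simp [PySem.Chars.count.go]
  | cons hd t ih =>
    cases fuel with
    | zero => simp at h
    | succ n =>
      simp only [List.length_cons, Nat.succ_le_succ_iff] at h
      by_cases hc : hd = c
      · subst hc
        simp [PySem.Chars.count.go, List.isPrefixOf, ih _ _ h]
        omega
      · simp [PySem.Chars.count.go, List.isPrefixOf, Ne.symm hc, hc, ih _ _ h]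

theorem pv_count_single (c : Char) (s : List Char) :
    PySem.Chars.count s [c] = s.count c := by
  simp [PySem.Chars.count, pv_count_go c s s.length 0 le_rfl]

-- equal length and equal counts on a's own characters forces a permutation
theorem pv_count_perm (a b : List Char) (hl : a.length = b.length)
    (hc : ∀ c ∈ a, a.count c = b.count c) : a.Perm b := by
  have hf : a.Perm (b.filter (fun x => decide (x ∈ a))) := by
    rw [List.perm_iff_count]
    intro c
    by_cases hm : c ∈ a
    · rw [List.count_filter (by simpa using hm), hc c hm]
    · rw [List.count_eq_zero_of_not_mem hm,
        List.count_eq_zero_of_not_mem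
          (fun hmem => hm (by simpa using (List.mem_filter.mp hmem).2))]
  have hlen : (b.filter (fun x => decide (x ∈ a))).length = b.length := by
    rw [← hf.length_eq, hl]
  rwa [List.filter_eq_self.mpr (List.length_filter_eq_length_iff.mp hlen)] at hf

theorem pv_sameTerm_iff (a b : List Char) : pvSameTerm a b = true ↔ a.Perm b := by
  unfold pvSameTerm
  simp only [Bool.and_eq_true, beq_iff_eq, List.all_eq_true, pv_count_single]
  constructor
  · rintro ⟨hl, hc⟩; exact pv_count_perm a b hl hc
  · intro h; exact ⟨h.length_eq, fun c _ => h.count_eq c⟩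

-- sortJoin canonicalizes exactly permutation classes
theorem pv_sortJoin_iff (a b : List Char) : sortJoin a = sortJoin b ↔ a.Perm b :=
  PySem.List.sorted_id_eq_sorted_id_iff_perm a b

-- empty symmetric difference of the two canonical sets ↔ mutual coverage
theorem pv_per_candidate (ns ys : List (List Char)) :
    PySem.Set.equal PySem.Set.empty
      (PySem.Set.symmDiff (PySem.Set.ofList (ns.map (fun x => sortJoin x)))
        (PySem.Set.ofList (ys.map (fun x => sortJoin x)))) =
    (pvCovers ns ys && pvCovers ys ns) := by
  rw [Bool.eq_iff_iff, PySem.Set.equal_iff]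
  unfold pvCovers
  simp only [PySem.Set.mem_symmDiff, PySem.Set.mem_ofList, PySem.Set.empty,
    List.not_mem_nil, false_iff, List.mem_map, Bool.and_eq_true,
    List.all_eq_true, List.any_eq_true, pv_sameTerm_iff, not_or, not_and, not_not]
  constructor
  · intro h
    refine ⟨fun x hx => ?_, fun y hy => ?_⟩
    · by_contra hno
      push Not at hno
      rcases (h (sortJoin x)).1 ⟨x, hx, rfl⟩ with ⟨a, ha, he⟩
      exact hno a ha ((pv_sortJoin_iff a x).mp he).symm
    · by_contra hno
      push Not at hno
      rcases (h (sortJoin y)).2 ⟨y, hy, rfl⟩ with ⟨a, ha, he⟩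
      exact hno a ha ((pv_sortJoin_iff a y).mp he).symm
  · rintro ⟨h1, h2⟩ s
    constructor
    · rintro ⟨a, ha, he⟩
      rcases h1 a ha with ⟨y, hy, hp⟩
      exact ⟨y, hy, by rw [← he]; exact (pv_sortJoin_iff y a).mpr hp.symm⟩
    · rintro ⟨a, ha, he⟩
      rcases h2 a ha with ⟨x, hx, hp⟩
      exact ⟨x, hx, by rw [← he]; exact (pv_sortJoin_iff x a).mpr hp.symm⟩

-- ===== VERDICT (by name: the statement is the Claim_ definition above) =====
theorem check_if_model_exists_spec : Claim_equal_check_if_model_exists := by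
  intro model_name model_list _
  unfold Spec_check_if_model_exists check_if_model_exists check_if_model_exists_alt
  simp only [List.any_map, Function.comp_def]
  rw [PySem.List.any_congr_mem (fun x _ => pv_per_candidate
    (PySem.Chars.splitOn model_name.toList "+".toList)
    (PySem.Chars.splitOn x.toList "+".toList))]
  cases model_list.any (fun candidate =>
    pvCovers (PySem.Chars.splitOn model_name.toList "+".toList)
        (PySem.Chars.splitOn candidate.toList "+".toList) &&
      pvCovers (PySem.Chars.splitOn candidate.toList "+".toList)
        (PySem.Chars.splitOn model_name.toList "+".toList)) <;> simp
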